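-- pv_equiv track=rewrite | github.com/c788630/Numclass | src/numclass/classifiers/curiosities.py | _prefixes_base10
-- ===== SOURCE A (Python) =====
-- def _prefixes_base10(n: int) -> list[int]:
--     s = str(abs(n))
--     # no leading zeros for normal integers; if you want to allow them, that's a different concept
--     out: list[int] = []
--     cur = 0
--     for ch in s:
--         cur = cur * 10 + (ord(ch) - 48)
--         out.append(cur)
--     return out
-- ===== SOURCE B (Python) =====
-- def _prefixes_base10(n: int) -> list[int]:
--     m = abs(n)
--     if m == 0:
--         return [0]
--     out: list[int] = []
--     while m > 0:
--         out.append(m)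
--         m //= 10
--     out.reverse()
--     return out
-- ===== Notes on version B (the rewrite author's own statement) =====
-- stated objective: alternative
-- what changed: Replaces the string conversion and left-to-right digit accumulation with pure integer arithmetic: repeatedly record the residual and strip its last decimal digit by floor division, then reverse; zero is the explicit base case.
import Mathlib
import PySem

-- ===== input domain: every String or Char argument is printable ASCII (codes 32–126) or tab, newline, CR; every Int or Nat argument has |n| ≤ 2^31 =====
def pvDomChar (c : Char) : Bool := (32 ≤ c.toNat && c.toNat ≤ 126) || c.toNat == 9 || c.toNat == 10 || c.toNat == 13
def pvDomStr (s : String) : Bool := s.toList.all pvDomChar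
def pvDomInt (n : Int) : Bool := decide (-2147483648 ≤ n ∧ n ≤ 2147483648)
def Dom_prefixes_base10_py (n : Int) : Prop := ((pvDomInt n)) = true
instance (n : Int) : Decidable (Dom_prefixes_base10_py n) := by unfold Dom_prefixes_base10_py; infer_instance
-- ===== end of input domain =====

-- B replaces A's string conversion and left-to-right prefix accumulation by pure
-- integer arithmetic: strip trailing decimal digits by floor division, collect residuals, reverse.


-- ===== PORT A =====
-- A's loop body: cur = cur * 10 + (ord(ch) - 48); out.append(cur)
def pvStep (st : Int × List Int) (ch : Char) : Int × List Int :=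
  let cur := st.1 * 10 + ((ch.toNat : Int) - 48)
  (cur, st.2 ++ [cur])

-- s = str(abs(n)); fold A's loop body over its characters, return out
def prefixes_base10_py (n : Int) : List Int :=
  let s := (PySem.Int.toStr |n|).toList
  (s.foldl pvStep ((0 : Int), ([] : List Int))).2

-- ===== PORT B =====
-- while m > 0: out.append(m); m //= 10
def pvAltLoop (m : Nat) (acc : List Int) : List Int :=
  if h : m = 0 then acc
  else pvAltLoop (m / 10) (acc ++ [(m : Int)])
termination_by m
decreasing_by exact Nat.div_lt_self (Nat.pos_of_ne_zero h) (by norm_num)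

def prefixes_base10_py_alt (n : Int) : List Int :=
  let m := n.natAbs
  if m = 0 then [0]
  else (pvAltLoop m []).reverse

-- ===== PRECONDITION & SPEC =====
def Spec_prefixes_base10_py (n : Int) (out : List Int) : Prop := out = prefixes_base10_py_alt n
instance (n : Int) (out : List Int) : Decidable (Spec_prefixes_base10_py n out) := by unfold Spec_prefixes_base10_py; infer_instance

-- ===== CLAIM (what is proved, stated in full; the proofs are below) =====
def Claim_equal_prefixes_base10_py : Prop := ∀ (n : Int), Dom_prefixes_base10_py n → Spec_prefixes_base10_py n (prefixes_base10_py n)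

-- ===== LEMMAS AND PROOFS =====

theorem pvToDigitsCore_shift (f : Nat) : ∀ (n : Nat) (ds : List Char),
    Nat.toDigitsCore 10 f n ds = Nat.toDigitsCore 10 f n [] ++ ds := by
  induction f with
  | zero => intro n ds; simp [Nat.toDigitsCore]
  | succ f ih =>
    intro n ds
    simp only [Nat.toDigitsCore]
    by_cases h : n / 10 = 0
    · simp [h]
    · simp only [h, if_false]
      rw [ih (n / 10) [Nat.digitChar (n % 10)], ih (n / 10) (Nat.digitChar (n % 10) :: ds)]
      simp

theorem pvToDigitsCore_fuel (f : Nat) : ∀ (f' n : Nat), n < f → n < f' →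
    Nat.toDigitsCore 10 f n [] = Nat.toDigitsCore 10 f' n [] := by
  induction f with
  | zero => intro f' n h; omega
  | succ f ih =>
    intro f' n hf hf'
    cases f' with
    | zero => omega
    | succ f' =>
      simp only [Nat.toDigitsCore]
      by_cases h : n / 10 = 0
      · simp [h]
      · simp only [h, if_false]
        rw [pvToDigitsCore_shift, pvToDigitsCore_shift f']
        have hn : 0 < n := by
          rcases Nat.eq_zero_or_pos n with h0 | h0
          · exact absurd (by simp [h0]) h
          · exact h0
        have hd : n / 10 < n := Nat.div_lt_self hn (by norm_num)
        rw [ih f' (n / 10) (by omega) (by omega)]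

theorem pvToDigits_small {m : Nat} (h : m < 10) :
    Nat.toDigits 10 m = [Nat.digitChar m] := by
  simp [Nat.toDigits, Nat.toDigitsCore, Nat.div_eq_of_lt h, Nat.mod_eq_of_lt h]

theorem pvToDigits_step {m : Nat} (h : 10 ≤ m) :
    Nat.toDigits 10 m = Nat.toDigits 10 (m / 10) ++ [Nat.digitChar (m % 10)] := by
  have hne : m / 10 ≠ 0 := by
    intro h0; have := Nat.div_eq_of_lt (show m < 10 by omega); omega
  simp only [Nat.toDigits, Nat.toDigitsCore, hne, if_false]
  rw [pvToDigitsCore_shift]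
  congr 1
  exact pvToDigitsCore_fuel m (m / 10 + 1) (m / 10)
    (Nat.div_lt_self (by omega) (by norm_num)) (by omega)

theorem pvDigitChar_toNat {d : Nat} (h : d < 10) :
    (Nat.digitChar d).toNat = 48 + d := by
  interval_cases d <;> decide

theorem pvAltLoop_factor (m : Nat) (acc : List Int) :
    pvAltLoop m acc = acc ++ pvAltLoop m [] := by
  induction m using Nat.strong_induction_on generalizing acc with
  | _ m ih =>
    by_cases h : m = 0
    · simp [pvAltLoop, h]
    · have hlt : m / 10 < m := Nat.div_lt_self (Nat.pos_of_ne_zero h) (by norm_num)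
      rw [pvAltLoop, dif_neg h, ih (m / 10) hlt (acc ++ [(m : Int)])]
      conv_rhs => rw [pvAltLoop, dif_neg h, ih (m / 10) hlt ([] ++ [(m : Int)])]
      simp

-- B's output for a positive residual, as one list
theorem pvAlt_rev (m : Nat) (h : m ≠ 0) :
    (pvAltLoop m []).reverse =
      (if m / 10 = 0 then ([] : List Int) else (pvAltLoop (m / 10) []).reverse) ++ [(m : Int)] := by
  rw [pvAltLoop, dif_neg h, pvAltLoop_factor]
  by_cases h10 : m / 10 = 0
  · simp [h10, pvAltLoop]
  · simp [h10]

-- the main invariant: A's fold over the decimal digits of m lands on (m, B's output)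
theorem pvMain (m : Nat) :
    (Nat.toDigits 10 m).foldl pvStep ((0 : Int), ([] : List Int))
      = ((m : Int), if m = 0 then [(0 : Int)] else (pvAltLoop m []).reverse) := by
  induction m using Nat.strong_induction_on with
  | _ m ih =>
    by_cases hs : m < 10
    · rw [pvToDigits_small hs]
      simp only [List.foldl_cons, List.foldl_nil, pvStep, pvDigitChar_toNat hs]
      by_cases h0 : m = 0
      · simp [h0]
      · rw [if_neg h0, pvAlt_rev m h0]
        have : m / 10 = 0 := Nat.div_eq_of_lt hs
        simp [this]
    · rw [not_lt] at hs
      rw [pvToDigits_step hs, List.foldl_append,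
        ih (m / 10) (Nat.div_lt_self (by omega) (by norm_num))]
      have hne : m / 10 ≠ 0 := by
        intro h0; have := Nat.div_eq_of_lt (show m < 10 by omega); omega
      simp only [if_neg hne, List.foldl_cons, List.foldl_nil, pvStep,
        pvDigitChar_toNat (Nat.mod_lt m (by norm_num : 0 < 10))]
      have hcur : ((m / 10 : Nat) : Int) * 10 + (((48 + m % 10 : Nat) : Int) - 48)
          = (m : Int) := by push_cast; omega
      rw [hcur]
      rw [if_neg (show m ≠ 0 by omega), pvAlt_rev m (by omega), if_neg hne]

-- ===== VERDICT (by name: the statement is the Claim_ definition above) =====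
theorem prefixes_base10_py_spec : Claim_equal_prefixes_base10_py := by
  intro n _
  unfold Spec_prefixes_base10_py prefixes_base10_py prefixes_base10_py_alt
  have hchars : (PySem.Int.toStr |n|).toList = Nat.toDigits 10 n.natAbs := by
    rw [PySem.Int.toList_toStr]
    rw [PySem.Int.toChars, if_neg (not_lt.mpr (abs_nonneg n))]
    congr 1
    rw [Int.abs_eq_natAbs, Int.toNat_natCast]
  simp only [hchars, pvMain n.natAbs]
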